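-- pv_equiv track=rewrite | github.com/anbansal/Python-for-Everybody | Ch8-Lists/exercise4EndOfChp.py | uniqueWordsList
-- ===== SOURCE A (Python) =====
-- def uniqueWordsList(fhand):
--     uniqueWords = list()
--     for line in fhand:
--         words = line.split()
--         for word in words:
--             try:
--                 uniqueWords.remove(word)
--             except:
--                 pass
--             uniqueWords.append(word)
--     uniqueWords.sort()
--     return uniqueWords
-- ===== SOURCE B (Python) =====
-- def uniqueWordsList(fhand):
--     allWords = []
--     for line in fhand:
--         allWords += line.split()
--     allWords.sort()
--     out = []
--     for w in allWords:
--         if not out or out[-1] != w: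
--             out.append(w)
--     return out
-- ===== Notes on version B (the rewrite author's own statement) =====
-- stated objective: faster
-- what changed: B collects all words (duplicates included) in one pass, sorts the full list once, and removes duplicates in a single adjacent-compare scan, instead of A's per-word list.remove/append dedup during the scan followed by a sort.
import Mathlib
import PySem

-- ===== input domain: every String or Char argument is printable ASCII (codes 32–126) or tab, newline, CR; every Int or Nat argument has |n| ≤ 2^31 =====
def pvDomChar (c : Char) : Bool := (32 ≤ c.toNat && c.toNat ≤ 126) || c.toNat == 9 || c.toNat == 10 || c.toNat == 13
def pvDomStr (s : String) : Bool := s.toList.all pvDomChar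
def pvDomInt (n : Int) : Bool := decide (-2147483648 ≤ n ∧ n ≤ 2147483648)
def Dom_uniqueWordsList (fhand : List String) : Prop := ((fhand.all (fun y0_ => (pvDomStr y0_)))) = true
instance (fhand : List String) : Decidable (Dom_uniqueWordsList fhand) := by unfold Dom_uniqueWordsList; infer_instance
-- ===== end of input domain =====

-- B sorts the whole word list once and deduplicates adjacent equals in one scan, replacing A's quadratic remove/append dedup; return values proved equal.

-- ===== PORT A =====
-- inner-loop body of A: try remove(word) / except pass; then append(word)
def pvAstep (acc : List String) (word : String) : List String :=
  (match PySem.List.remove? acc word with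
   | some r => r
   | none => acc) ++ [word]

def uniqueWordsList (fhand : List String) : List String :=
  let uniqueWords := fhand.foldl (fun acc line => (PySem.Str.split₀ line).foldl pvAstep acc) []
  PySem.List.sorted uniqueWords (fun x => x) false

-- ===== PORT B =====
-- loop body of B's dedup scan: append w unless out is nonempty with out[-1] == w
def pvBstep (out : List String) (w : String) : List String :=
  if out.getLast? = some w then out else out ++ [w]

def uniqueWordsList_alt (fhand : List String) : List String :=
  let allWords := fhand.foldl (fun acc line => acc ++ PySem.Str.split₀ line) []
  let sw := PySem.List.sorted allWords (fun x => x) false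
  sw.foldl pvBstep []

-- ===== PRECONDITION & SPEC =====
def Spec_uniqueWordsList (fhand : List String) (out : List String) : Prop := out = uniqueWordsList_alt fhand
instance (fhand : List String) (out : List String) : Decidable (Spec_uniqueWordsList fhand out) := by unfold Spec_uniqueWordsList; infer_instance

-- ===== CLAIM (what is proved, stated in full; the proofs are below) =====
def Claim_equal_uniqueWordsList : Prop := ∀ (fhand : List String), Dom_uniqueWordsList fhand → Spec_uniqueWordsList fhand (uniqueWordsList fhand)

-- ===== LEMMAS AND PROOFS =====

-- A's nested loop over lines-then-words is a single fold over the concatenated word list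
lemma afold_flat (fhand : List String) (init : List String) :
    fhand.foldl (fun acc line => (PySem.Str.split₀ line).foldl pvAstep acc) init
      = (fhand.flatMap PySem.Str.split₀).foldl pvAstep init := by
  induction fhand generalizing init with
  | nil => rfl
  | cons l ls ih => simp [List.flatMap_cons, List.foldl_append, ih]

-- invariant of A's accumulator: it stays duplicate-free and holds exactly the words seen
lemma afold_inv (ws : List String) (acc : List String) (h : acc.Nodup) :
    (ws.foldl pvAstep acc).Nodup ∧ (∀ x, x ∈ ws.foldl pvAstep acc ↔ x ∈ acc ∨ x ∈ ws) := by
  induction ws generalizing acc with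
  | nil => simpa using h
  | cons w t ih =>
    have hstep : pvAstep acc w = (if w ∈ acc then acc.erase w else acc) ++ [w] := by
      by_cases hw : w ∈ acc
      · simp [pvAstep, PySem.List.remove?_eq_some_erase acc w hw, hw]
      · simp [pvAstep, (PySem.List.remove?_eq_none_iff acc w).mpr hw, hw]
    have hnd : (pvAstep acc w).Nodup := by
      rw [hstep]
      by_cases hw : w ∈ acc
      · simp only [hw, if_true]
        refine List.Nodup.append (h.erase w) (List.nodup_singleton w) ?_
        intro a ha hb
        simp at hb; subst hb
        exact (List.Nodup.not_mem_erase h) ha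
      · simp only [hw, if_false]
        exact List.Nodup.append h (List.nodup_singleton w) (by
          intro a ha hb; simp at hb; subst hb; exact hw ha)
    have hmem : ∀ x, x ∈ pvAstep acc w ↔ x ∈ acc ∨ x = w := by
      intro x
      rw [hstep]
      by_cases hw : w ∈ acc
      · simp only [hw, if_true, List.mem_append, List.mem_singleton]
        constructor
        · rintro (hx | hx)
          · exact Or.inl (List.mem_of_mem_erase hx)
          · exact Or.inr hx
        · rintro (hx | hx)
          · by_cases hxw : x = w
            · exact Or.inr hxw
            · exact Or.inl (List.mem_erase_of_ne hxw |>.mpr hx)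
          · exact Or.inr hx
      · simp [hw]
    obtain ⟨ihnd, ihmem⟩ := ih (pvAstep acc w) hnd
    refine ⟨ihnd, fun x => ?_⟩
    rw [List.foldl_cons, ihmem x, hmem x]
    simp [or_assoc]

-- in a strictly increasing list every element is ≤ the last one
lemma le_getLast_of_pairwise_lt (res : List String) (h : res.Pairwise (· < ·))
    {y z : String} (hy : y ∈ res) (hz : res.getLast? = some z) : y ≤ z := by
  induction res with
  | nil => cases hy
  | cons a t ih =>
    cases t with
    | nil =>
      simp at hy hz; subst hy; subst hz; exact le_refl _
    | cons b t' =>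
      rw [List.getLast?_cons_cons] at hz
      rcases List.mem_cons.mp hy with hy | hy
      · subst hy
        have hzmem : z ∈ b :: t' := List.mem_of_getLast? hz
        have := (List.pairwise_cons.mp h).1 z hzmem
        exact le_of_lt this
      · exact ih (List.pairwise_cons.mp h).2 hy hz

-- invariant of B's dedup scan over a ≤-sorted list
lemma bfold_inv (l : List String) (res : List String)
    (hl : l.Pairwise (· ≤ ·)) (hres : res.Pairwise (· < ·))
    (hord : ∀ y ∈ res, ∀ x ∈ l, y ≤ x) :
    (l.foldl pvBstep res).Pairwise (· < ·) ∧
      (∀ x, x ∈ l.foldl pvBstep res ↔ x ∈ res ∨ x ∈ l) := by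
  induction l generalizing res with
  | nil => exact ⟨hres, by simp⟩
  | cons w t ih =>
    have hlt : t.Pairwise (· ≤ ·) := (List.pairwise_cons.mp hl).2
    have hwle : ∀ x ∈ t, w ≤ x := (List.pairwise_cons.mp hl).1
    by_cases hlast : res.getLast? = some w
    · have hstep : pvBstep res w = res := by simp [pvBstep, hlast]
      have hwmem : w ∈ res := List.mem_of_getLast? hlast
      obtain ⟨p1, p2⟩ := ih res hlt hres
        (fun y hy x hx => hord y hy x (List.mem_cons_of_mem _ hx))
      refine ⟨by rwa [List.foldl_cons, hstep], fun x => ?_⟩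
      rw [List.foldl_cons, hstep, p2 x]
      constructor
      · rintro (hx | hx)
        · exact Or.inl hx
        · exact Or.inr (List.mem_cons_of_mem _ hx)
      · rintro (hx | hx)
        · exact Or.inl hx
        · rcases List.mem_cons.mp hx with hx | hx
          · subst hx; exact Or.inl hwmem
          · exact Or.inr hx
    · have hstep : pvBstep res w = res ++ [w] := by simp [pvBstep, hlast]
      have hreslt : ∀ y ∈ res, y < w := by
        intro y hy
        cases hres' : res.getLast? with
        | none => rw [List.getLast?_eq_none_iff] at hres'; subst hres'; cases hy
        | some z =>
          have hyz : y ≤ z := le_getLast_of_pairwise_lt res hres hy hres'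
          have hzw : z ≤ w := hord z (List.mem_of_getLast? hres') w (List.mem_cons_self ..)
          exact lt_of_le_of_lt hyz (lt_of_le_of_ne hzw (fun h => hlast (h ▸ hres')))
      have hres' : (res ++ [w]).Pairwise (· < ·) := by
        refine List.pairwise_append.mpr ⟨hres, List.pairwise_singleton _ _, ?_⟩
        intro a ha b hb; simp at hb; subst hb; exact hreslt a ha
      have hord' : ∀ y ∈ res ++ [w], ∀ x ∈ t, y ≤ x := by
        intro y hy x hx
        rcases List.mem_append.mp hy with hy | hy
        · exact hord y hy x (List.mem_cons_of_mem _ hx)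
        · simp at hy; subst hy; exact hwle x hx
      obtain ⟨p1, p2⟩ := ih (res ++ [w]) hlt hres' hord'
      refine ⟨by rwa [List.foldl_cons, hstep], fun x => ?_⟩
      rw [List.foldl_cons, hstep, p2 x]
      simp [or_assoc]

-- ===== VERDICT (by name: the statement is the Claim_ definition above) =====
theorem uniqueWordsList_spec : Claim_equal_uniqueWordsList := by
  intro fhand _
  unfold Spec_uniqueWordsList uniqueWordsList uniqueWordsList_alt
  simp only [PySem.List.foldl_append_eq_flatMap, List.nil_append, afold_flat]
  set ws := fhand.flatMap PySem.Str.split₀ with hws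
  obtain ⟨hand, hamem⟩ := afold_inv ws [] List.nodup_nil
  set afold := ws.foldl pvAstep [] with hafold
  set sw := PySem.List.sorted ws (fun x => x) false with hsw
  have hswp : sw.Pairwise (· ≤ ·) := PySem.List.sorted_pairwise ws (fun x => x)
  obtain ⟨hbp, hbmem⟩ := bfold_inv sw [] hswp List.Pairwise.nil (by simp)
  set bres := sw.foldl pvBstep [] with hbres
  have hbnd : bres.Nodup := hbp.imp ne_of_lt
  have hmemeq : ∀ x, x ∈ bres ↔ x ∈ afold := by
    intro x
    rw [hbmem x, hamem x]
    rw [hsw, PySem.List.mem_sorted]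
  have hperm : bres.Perm afold := (List.perm_ext_iff_of_nodup hbnd hand).mpr hmemeq
  exact PySem.List.sorted_eq_of_perm_of_pairwise_lt afold bres (fun x => x) hperm hbp
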